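-- pv_equiv track=rewrite | github.com/Andy46/adventofcode | 2015/03_PerfectlySphericalHousesInAVacuum/main.py | calculatePathSantaRobot
-- ===== SOURCE A (Python) =====
-- TOKEN_NORTH = '^'
--
-- TOKEN_EAST  = '<'
--
-- TOKEN_SOUTH = 'v'
--
-- TOKEN_WEST  = '>'
--
-- def move(x, y, token):
--     if token == TOKEN_NORTH:
--         return x+1, y
--     if token == TOKEN_EAST:
--         return x, y+1
--     if token == TOKEN_SOUTH:
--         return x-1, y
--     if token == TOKEN_WEST:
--         return x, y-1
--
-- def calculatePathSantaRobot(route):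
--     pathSanta = [[0,0]]
--     pathRobot = [[0,0]]
--     count = 0
--     for instruction in route:
--         if count % 2 == 0:
--             x, y = pathSanta[-1]
--             x, y = move (x, y, instruction)
--             pathSanta.append([x, y])
--         else:
--             x, y = pathRobot[-1]
--             x, y = move (x, y, instruction)
--             pathRobot.append([x, y])
--         count = count + 1
--     return pathSanta, pathRobot
-- ===== SOURCE B (Python) =====
-- def _walk(moves):
--     x = y = 0
--     path = [[0, 0]]
--     for t in moves:
--         if t == '^':
--             x += 1
--         elif t == '<':
--             y += 1
--         elif t == 'v':
--             x -= 1
--         elif t == '>':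
--             y -= 1
--         else:
--             raise ValueError("unknown move token: %r" % (t,))
--         path.append([x, y])
--     return path
--
-- def calculatePathSantaRobot(route):
--     return _walk(route[0::2]), _walk(route[1::2])
-- ===== Notes on version B (the rewrite author's own statement) =====
-- stated objective: simpler
-- what changed: B splits the route by parity into route[0::2] and route[1::2] and walks each sub-route with one plain accumulator scan, replacing A's single interleaved loop with a parity counter and repeated path[-1] reads.
import Mathlib
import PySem

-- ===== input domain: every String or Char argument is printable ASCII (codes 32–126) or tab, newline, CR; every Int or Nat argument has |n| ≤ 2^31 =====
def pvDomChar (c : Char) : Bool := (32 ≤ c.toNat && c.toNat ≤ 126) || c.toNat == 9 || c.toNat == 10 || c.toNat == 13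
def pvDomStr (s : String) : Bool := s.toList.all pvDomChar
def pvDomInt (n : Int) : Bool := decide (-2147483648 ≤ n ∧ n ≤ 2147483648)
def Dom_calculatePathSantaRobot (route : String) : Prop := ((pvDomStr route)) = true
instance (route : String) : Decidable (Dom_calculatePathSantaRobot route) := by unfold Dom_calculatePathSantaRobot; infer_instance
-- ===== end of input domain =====

-- B splits the route into the two strided sub-routes first (route[0::2], route[1::2])
-- and walks each with one simple scan, instead of A's single interleaved loop with a
-- parity counter; objective: simpler decomposition (same asymptotic cost).

-- ===== PORT A =====
-- move returns none where Python's move returns None (unknown token);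
-- A then raises TypeError on unpacking, which Pre_ excludes.
def moveA (x y : Int) (token : Char) : Option (Int × Int) :=
  if token = '^' then some (x + 1, y)
  else if token = '<' then some (x, y + 1)
  else if token = 'v' then some (x - 1, y)
  else if token = '>' then some (x, y - 1)
  else none

-- the for-loop of A over the route, state = (pathSanta, pathRobot, count);
-- where Python raises (unknown token / malformed last element) the port stops and
-- returns the state so far — unreachable inside Pre_.
def loopA : List Char → List (List Int) → List (List Int) → Int → List (List Int) × List (List Int)
  | [], pathSanta, pathRobot, _ => (pathSanta, pathRobot)
  | instruction :: rest, pathSanta, pathRobot, count =>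
    if PySem.Int.mod count 2 = 0 then
      match PySem.List.pyGet? pathSanta (-1) with
      | some [x, y] =>
        match moveA x y instruction with
        | some (x', y') => loopA rest (pathSanta ++ [[x', y']]) pathRobot (count + 1)
        | none => (pathSanta, pathRobot)
      | _ => (pathSanta, pathRobot)
    else
      match PySem.List.pyGet? pathRobot (-1) with
      | some [x, y] =>
        match moveA x y instruction with
        | some (x', y') => loopA rest pathSanta (pathRobot ++ [[x', y']]) (count + 1)
        | none => (pathSanta, pathRobot)
      | _ => (pathSanta, pathRobot)

def calculatePathSantaRobot (route : String) : List (List Int) × List (List Int) :=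
  loopA route.toList [[0, 0]] [[0, 0]] 0

-- ===== PORT B =====
-- the body of _walk's for-loop, state = (x, y, path); on an unknown token Python
-- raises ValueError (excluded by Pre_) — the port returns the state unchanged there
def stepB (st : Int × Int × List (List Int)) (t : Char) : Int × Int × List (List Int) :=
  let (x, y, path) := st
  if t = '^' then (x + 1, y, path ++ [[x + 1, y]])
  else if t = '<' then (x, y + 1, path ++ [[x, y + 1]])
  else if t = 'v' then (x - 1, y, path ++ [[x - 1, y]])
  else if t = '>' then (x, y - 1, path ++ [[x, y - 1]])
  else st

def walkB (moves : List Char) : List (List Int) :=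
  (moves.foldl stepB (0, 0, [[0, 0]])).2.2

def calculatePathSantaRobot_alt (route : String) : List (List Int) × List (List Int) :=
  -- route[0::2] / route[1::2]; slice? with step 2 ≠ 0 never returns none,
  -- so the none branch is unreachable
  match PySem.List.slice? route.toList (some 0) none 2,
        PySem.List.slice? route.toList (some 1) none 2 with
  | some santaMoves, some robotMoves => (walkB santaMoves, walkB robotMoves)
  | _, _ => ([], [])

-- ===== PRECONDITION & SPEC =====
-- Pre_ excludes routes containing a character other than the four move tokens:
-- there Python's move returns None and A raises TypeError while unpacking it.
def Pre_calculatePathSantaRobot (route : String) : Prop :=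
  (route.toList.all (fun c => c = '^' || c = '<' || c = 'v' || c = '>')) = true

instance (route : String) : Decidable (Pre_calculatePathSantaRobot route) := by
  unfold Pre_calculatePathSantaRobot; infer_instance

def pvWitness_calculatePathSantaRobot : String := "^>v<^"

def Spec_calculatePathSantaRobot (route : String) (out : List (List Int) × List (List Int)) : Prop :=
  out = calculatePathSantaRobot_alt route

instance (route : String) (out : List (List Int) × List (List Int)) :
    Decidable (Spec_calculatePathSantaRobot route out) := by
  unfold Spec_calculatePathSantaRobot; infer_instance

-- ===== CLAIM =====
def Claim_equal_calculatePathSantaRobot : Prop :=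
  ∀ (route : String), Dom_calculatePathSantaRobot route →
    Pre_calculatePathSantaRobot route →
    Spec_calculatePathSantaRobot route (calculatePathSantaRobot route)

-- ===== LEMMAS AND PROOFS =====

-- elements at even positions
def evens {α : Type} : List α → List α
  | [] => []
  | [a] => [a]
  | a :: _ :: rest => a :: evens rest

theorem evens_cons {α : Type} (c : α) (cs : List α) :
    evens (c :: cs) = c :: evens cs.tail := by
  cases cs <;> simp [evens]

theorem fmr_evens {α : Type} : ∀ (xs : List α),
    List.filterMap (fun k => xs[2 * k]?) (List.range ((xs.length + 1) / 2)) = evens xs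
  | [] => by simp [evens]
  | [a] => by simp [evens, List.range_succ]
  | a :: b :: cs => by
    have ih := fmr_evens cs
    have hlen : (( a :: b :: cs).length + 1) / 2 = (cs.length + 1) / 2 + 1 := by
      simp [List.length_cons]; omega
    rw [hlen, List.range_succ_eq_map]
    simp only [List.filterMap_cons, List.filterMap_map]
    have h0 : (a :: b :: cs)[2 * 0]? = some a := by simp
    rw [h0]
    have hf : ((fun k => (a :: b :: cs)[2 * k]?) ∘ Nat.succ) = fun k => cs[2 * k]? := by
      funext k
      show (a :: b :: cs)[2 * (k + 1)]? = cs[2 * k]?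
      have : 2 * (k + 1) = (2 * k) + 1 + 1 := by omega
      rw [this]
      simp
    rw [hf, ih, evens]

theorem fmr_odds {α : Type} : ∀ (xs : List α),
    List.filterMap (fun k => xs[2 * k + 1]?) (List.range (xs.length / 2)) = evens xs.tail
  | [] => by simp [evens]
  | [a] => by simp [evens]
  | a :: b :: cs => by
    have ih := fmr_odds cs
    have hlen : (a :: b :: cs).length / 2 = cs.length / 2 + 1 := by
      simp [List.length_cons]; omega
    rw [hlen, List.range_succ_eq_map]
    simp only [List.filterMap_cons, List.filterMap_map]
    have h0 : (a :: b :: cs)[2 * 0 + 1]? = some b := by simp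
    rw [h0]
    have hf : ((fun k => (a :: b :: cs)[2 * k + 1]?) ∘ Nat.succ) = fun k => cs[2 * k + 1]? := by
      funext k
      show (a :: b :: cs)[2 * (k + 1) + 1]? = cs[2 * k + 1]?
      have : 2 * (k + 1) + 1 = (2 * k + 1) + 1 + 1 := by omega
      rw [this]
      simp
    rw [hf, ih]
    show _ = evens (b :: cs)
    cases cs <;> simp [evens]
theorem slice?_step2_zero {α : Type} (xs : List α) :
    PySem.List.slice? xs (some 0) none 2 = some (evens xs) := by
  rw [← fmr_evens xs]
  simp only [PySem.List.slice?, PySem.List.sliceIndices]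
  norm_num
  have h1 : (if 0 < xs.length then (((xs.length : Int) + 2 - 1) / 2).toNat else 0)
      = (xs.length + 1) / 2 := by
    split <;> omega
  have h2 : (fun x : Nat => xs[(2 * (x : Int)).toNat]?) = fun k : Nat => xs[2 * k]? := by
    funext k
    congr 1
  rw [h1, h2]

theorem slice?_step2_one {α : Type} (xs : List α) :
    PySem.List.slice? xs (some 1) none 2 = some (evens xs.tail) := by
  cases xs with
  | nil => simp [PySem.List.slice?, PySem.List.sliceIndices, evens]
  | cons a tl =>
    rw [← fmr_odds (a :: tl)]
    simp only [PySem.List.slice?, PySem.List.sliceIndices]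
    norm_num
    have h1 : (if 0 < tl.length then (((tl.length : Int) + 2 - 1) / 2).toNat else 0)
        = (tl.length + 1) / 2 := by
      split <;> omega
    have h2 : (fun x : Nat => (a :: tl)[(1 + 2 * (x : Int)).toNat]?)
        = fun k : Nat => tl[2 * k]? := by
      funext k
      have hk : (1 + 2 * (k : Int)).toNat = 2 * k + 1 := by omega
      rw [hk]
      simp
    rw [h1, h2]

-- Python's count % 2 (PySem.Int.mod) for divisor 2 is Lean's emod
theorem pymod2 (n : Int) : PySem.Int.mod n 2 = n % 2 := by
  simp [PySem.Int.mod, Int.fmod_eq_emod]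

-- the generalized B walk: fold from an arbitrary position/path
theorem foldB_token (x y : Int) (p : List (List Int)) (c : Char) (ms : List Char)
    (hc : c = '^' ∨ c = '<' ∨ c = 'v' ∨ c = '>') :
    ∃ x' y', moveA x y c = some (x', y') ∧
      List.foldl stepB (x, y, p) (c :: ms)
        = List.foldl stepB (x', y', p ++ [[x', y']]) ms := by
  rcases hc with h | h | h | h <;> subst h <;>
    exact ⟨_, _, rfl, rfl⟩

-- main invariant: A's interleaved loop equals the two strided B walks
theorem loopA_eq (cs : List Char)
    (hcs : ∀ c ∈ cs, c = '^' ∨ c = '<' ∨ c = 'v' ∨ c = '>') :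
    ∀ (x1 y1 x2 y2 : Int) (p1 p2 : List (List Int)) (count : Int),
    loopA cs (p1 ++ [[x1, y1]]) (p2 ++ [[x2, y2]]) count =
      if count % 2 = 0 then
        ((List.foldl stepB (x1, y1, p1 ++ [[x1, y1]]) (evens cs)).2.2,
         (List.foldl stepB (x2, y2, p2 ++ [[x2, y2]]) (evens cs.tail)).2.2)
      else
        ((List.foldl stepB (x1, y1, p1 ++ [[x1, y1]]) (evens cs.tail)).2.2,
         (List.foldl stepB (x2, y2, p2 ++ [[x2, y2]]) (evens cs)).2.2) := by
  induction cs with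
  | nil => intro x1 y1 x2 y2 p1 p2 count; split <;> simp [loopA, evens]
  | cons c rest ih =>
    intro x1 y1 x2 y2 p1 p2 count
    have hc : c = '^' ∨ c = '<' ∨ c = 'v' ∨ c = '>' := hcs c (by simp)
    have hrest : ∀ c ∈ rest, c = '^' ∨ c = '<' ∨ c = 'v' ∨ c = '>' :=
      fun d hd => hcs d (by simp [hd])
    by_cases hpar : count % 2 = 0
    · obtain ⟨x', y', hmv, hfold⟩ :=
        foldB_token x1 y1 (p1 ++ [[x1, y1]]) c (evens rest.tail) hc
      rw [evens_cons]
      simp only [loopA, pymod2, if_pos hpar, PySem.List.pyGet?_neg_one_append_singleton, hmv]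
      rw [ih hrest x' y' x2 y2 (p1 ++ [[x1, y1]]) p2 (count + 1)]
      rw [if_neg (by omega : ¬ (count + 1) % 2 = 0), hfold]
      simp only [List.tail_cons]
    · obtain ⟨x', y', hmv, hfold⟩ :=
        foldB_token x2 y2 (p2 ++ [[x2, y2]]) c (evens rest.tail) hc
      rw [evens_cons]
      simp only [loopA, pymod2, if_neg hpar, PySem.List.pyGet?_neg_one_append_singleton, hmv]
      rw [ih hrest x1 y1 x' y' p1 (p2 ++ [[x2, y2]]) (count + 1)]
      rw [if_pos (by omega : (count + 1) % 2 = 0), hfold]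
      simp only [List.tail_cons]

-- ===== VERDICT =====
theorem calculatePathSantaRobot_spec : Claim_equal_calculatePathSantaRobot := by
  intro route _ hpre
  unfold Spec_calculatePathSantaRobot calculatePathSantaRobot calculatePathSantaRobot_alt
  rw [slice?_step2_zero, slice?_step2_one]
  have hcs : ∀ c ∈ route.toList, c = '^' ∨ c = '<' ∨ c = 'v' ∨ c = '>' := by
    intro c hc
    have := List.all_eq_true.mp hpre c hc
    simp only [Bool.or_eq_true, decide_eq_true_eq] at this
    tauto
  have := loopA_eq route.toList hcs 0 0 0 0 [] [] 0
  simpa [walkB] using this
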